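-- pv_equiv track=rewrite | github.com/ttasjwi/algorithm | 문제풀이/온라인 저지/프로그래머스/# 02. Level 2/# 017680. [1차] 캐시/python/solution2.py | solution
-- ===== SOURCE A (Python) =====
-- class LRUCache:
--     class Node:
--         def __init__(self, prev, next, data):
--             self.prev = prev
--             self.next = next
--             self.data = data
--
--     def __init__(self, capacity):
--         self.capacity = capacity
--         self.head = None
--         self.tail = None
--         self.size = 0
--         self.dict = {}
--
--     def contains(self, data):
--         return data in self.dict
--
--     def append(self, data):
--         if not self.capacity:
--             return
--         if data in self.dict:
--             node = self.dict[data]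
--             self.__unlink(node)
--         elif self.size == self.capacity:
--             self.__unlink(self.head)
--         self.__link_to_tail(data)
--
--     def __unlink(self, node):
--         prev_node = node.prev
--         next_node = node.next
--         if prev_node:
--             prev_node.next = next_node
--         else:
--             self.head = next_node
--
--         if next_node:
--             next_node.prev = prev_node
--         else:
--             self.tail = prev_node
--         node.prev = None
--         node.next = None
--         self.size -= 1
--         self.dict.pop(node.data)
--         node.data = None
--
--     def __link_to_tail(self, data):
--         node = LRUCache.Node(self.tail, None, data)
--         if not self.tail:
--             self.head = node
--         else:
--             self.tail.next = node
--         self.tail = node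
--         self.size += 1
--         self.dict[data] = node
--
-- def solution(cacheSize, cities):
--     cache = LRUCache(cacheSize)
--     process_time = 0
--     for city in cities:
--         city = city.lower()
--         if cache.contains(city):
--             process_time += 1
--         else:
--             process_time += 5
--         cache.append(city)
--     return process_time
-- ===== SOURCE B (Python) =====
-- def solution(cacheSize, cities):
--     history = []
--     total = 0
--     for city in cities:
--         city = city.lower()
--         total += _access_cost(cacheSize, city, history)
--         history.append(city)
--     return total
--
-- def _access_cost(cacheSize, city, history):
--     # LRU stack-distance test: a hit iff the city was accessed before and the
--     # number of DISTINCT cities accessed since that access is < cacheSize.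
--     distinct = set()
--     for prev in reversed(history):
--         if prev == city:
--             return 1 if len(distinct) < cacheSize else 5
--         distinct.add(prev)
--     return 5
-- ===== Notes on version B (the rewrite author's own statement) =====
-- stated objective: alternative
-- what changed: Replaces the stateful LRU-cache simulation (linked list + dict of nodes) with a stateless per-access stack-distance test: for each city, scan the access history backwards counting distinct cities until its previous occurrence; it is a hit iff that distinct count is < cacheSize — no cache structure is ever built or maintained.
-- outside the precondition, e.g. on solution(-1, ['a', 'a']): A returns 6, B returns 10
import Mathlib
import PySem

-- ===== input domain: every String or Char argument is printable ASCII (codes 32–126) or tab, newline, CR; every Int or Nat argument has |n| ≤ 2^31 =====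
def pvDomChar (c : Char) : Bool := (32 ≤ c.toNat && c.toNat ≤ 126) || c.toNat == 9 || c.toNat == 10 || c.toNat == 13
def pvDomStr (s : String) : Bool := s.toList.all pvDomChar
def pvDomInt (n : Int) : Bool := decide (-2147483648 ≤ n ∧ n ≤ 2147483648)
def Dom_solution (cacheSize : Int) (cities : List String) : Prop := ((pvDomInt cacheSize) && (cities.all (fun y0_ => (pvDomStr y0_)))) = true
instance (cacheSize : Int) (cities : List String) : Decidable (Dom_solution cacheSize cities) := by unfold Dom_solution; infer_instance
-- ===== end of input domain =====

-- B drops A's stateful LRU-cache simulation for a stateless per-access stack-distance test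
-- (objective: alternative algorithm, same results, no cache structure maintained).

-- ===== PORT A =====
-- A's LRUCache state is modelled by the node list in head→tail order together with
-- the explicit `size` counter; the dict's only observable role is membership of `data`,
-- which coincides with membership in the node list (its keys are exactly the node datas).
-- LRUCache.append (with its two __unlink cases and __link_to_tail):
def lruAppendA (cap : Int) (lst : List String) (size : Int) (data : String) :
    List String × Int :=
  if cap = 0 then (lst, size)                              -- `if not self.capacity: return`
  else if lst.contains data then
    ((lst.erase data) ++ [data], (size - 1) + 1)           -- __unlink(node); __link_to_tail
  else if size = cap then
    ((lst.drop 1) ++ [data], (size - 1) + 1)               -- __unlink(self.head); __link_to_tail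
  else (lst ++ [data], size + 1)                           -- __link_to_tail only

def solutionLoopA (cap : Int) (lst : List String) (size : Int) (t : Int) :
    List String → Int
  | [] => t
  | city :: rest =>
    let c := PySem.Str.lower city
    let t' := if lst.contains c then t + 1 else t + 5
    let st := lruAppendA cap lst size c
    solutionLoopA cap st.1 st.2 t' rest

def solution (cacheSize : Int) (cities : List String) : Int :=
  solutionLoopA cacheSize [] 0 0 cities

-- ===== PORT B =====
-- B's `_access_cost`: backward scan over the history (`reversed(history)`), collecting
-- the distinct cities seen until the previous occurrence of `city`.
def accessCost (cap : Int) (city : String) : List String → PySem.Set String → Int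
  | [], _ => 5
  | p :: rest, seen =>
    if p = city then (if ((seen.length : Int) < cap) then 1 else 5)
    else accessCost cap city rest (PySem.Set.add seen p)

-- B's main loop: accumulate the cost, then append the lowercased city to the history.
def altLoop (cap : Int) : List String → List String → Int → Int
  | _, [], t => t
  | hist, city :: rest, t =>
    let c := PySem.Str.lower city
    altLoop cap (hist ++ [c]) rest (t + accessCost cap c hist.reverse PySem.Set.empty)

def solution_alt (cacheSize : Int) (cities : List String) : Int :=
  altLoop cacheSize [] cities 0

-- ===== PRECONDITION & SPEC =====
-- Pre_ excludes negative cacheSize, outside the task's natural domain: there A's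
-- `size == capacity` test never fires so A caches every city unboundedly, while B's
-- distance test `len(distinct) < cacheSize` never passes.
def Pre_solution (cacheSize : Int) (cities : List String) : Prop := 0 ≤ cacheSize
instance (cacheSize : Int) (cities : List String) : Decidable (Pre_solution cacheSize cities) := by unfold Pre_solution; infer_instance
def pvWitness_solution : Int × List String := (2, ["Seoul", "seoul", "Busan"])
def Spec_solution (cacheSize : Int) (cities : List String) (out : Int) : Prop := out = solution_alt cacheSize cities
instance (cacheSize : Int) (cities : List String) (out : Int) : Decidable (Spec_solution cacheSize cities out) := by unfold Spec_solution; infer_instance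

-- ===== CLAIM (what is proved, stated in full; the proofs are below) =====
def Claim_equal_solution : Prop := ∀ (cacheSize : Int) (cities : List String), Dom_solution cacheSize cities → Pre_solution cacheSize cities → Spec_solution cacheSize cities (solution cacheSize cities)

-- ===== LEMMAS AND PROOFS =====

-- `firsts r` = the distinct elements of r in order of first occurrence; for r the
-- REVERSED access history this is the most-recently-used-first recency order, and
-- A's cache list (head→tail = LRU→MRU) is its first `cacheSize` elements reversed.
def firsts : List String → List String
  | [] => []
  | a :: l => a :: (firsts l).erase a

theorem nodup_firsts (l : List String) : (firsts l).Nodup := by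
  induction l with
  | nil => simp [firsts]
  | cons a l ih =>
    simp only [firsts, List.nodup_cons]
    exact ⟨fun h => ((ih.mem_erase_iff).mp h).1 rfl, ih.erase a⟩

theorem mem_firsts (l : List String) (x : String) : x ∈ firsts l ↔ x ∈ l := by
  induction l with
  | nil => simp [firsts]
  | cons a l ih =>
    simp only [firsts, List.mem_cons]
    constructor
    · rintro (h | h)
      · exact Or.inl h
      · exact Or.inr (ih.mp ((nodup_firsts l).mem_erase_iff.mp h).2)
    · rintro (h | h)
      · exact Or.inl h
      · by_cases hxa : x = a
        · exact Or.inl hxa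
        · exact Or.inr ((nodup_firsts l).mem_erase_iff.mpr ⟨hxa, ih.mpr h⟩)

-- accessCost characterised: found ⟺ city ∈ r; the counted set is seen ∪ the prefix
-- before the first occurrence.
theorem accessCost_eq (cap : Int) (c : String) (r : List String) :
    ∀ seen : PySem.Set String,
      accessCost cap c r seen =
        if c ∈ r then
          (if ((PySem.Set.update seen (r.takeWhile (fun x => x != c))).length : Int) < cap
           then 1 else 5)
        else 5 := by
  induction r with
  | nil => intro seen; simp [accessCost]
  | cons p rest ih =>
    intro seen
    by_cases hp : p = c
    · subst hp
      simp [accessCost, PySem.Set.update]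
    · have hne : (p != c) = true := by simp [bne, hp]
      have hcc : (c ∈ p :: rest) = (c ∈ rest) := by
        simp only [List.mem_cons, eq_iff_iff]
        constructor
        · rintro (h | h)
          · exact absurd h.symm hp
          · exact h
        · exact Or.inr
      simp only [accessCost, if_neg hp, ih, List.takeWhile_cons, hne, if_true, hcc]
      rfl

-- two nodup lists with the same members have the same length
theorem length_eq_of_nodup_mem (l₁ l₂ : List String) (h₁ : l₁.Nodup) (h₂ : l₂.Nodup)
    (hm : ∀ x, x ∈ l₁ ↔ x ∈ l₂) : l₁.length = l₂.length := by
  rw [← List.toFinset_card_of_nodup h₁, ← List.toFinset_card_of_nodup h₂]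
  congr 1
  ext x
  simp [hm x]

theorem set_ofList_length (u : List String) :
    (PySem.Set.update PySem.Set.empty u).length = (firsts u).length := by
  have h1 : PySem.Set.update PySem.Set.empty u = PySem.Set.ofList u := by
    rw [PySem.Set.ofList_eq_foldl]; rfl
  rw [h1]
  exact length_eq_of_nodup_mem _ _ (PySem.Set.nodup_ofList u) (nodup_firsts u)
    (fun x => by rw [PySem.Set.mem_ofList, mem_firsts])

-- erasing c commutes with one extra layer of take
theorem take_erase (c : String) : ∀ (X : List String) (k : Nat),
    ((X.take (k+1)).erase c).take k = (X.erase c).take k := by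
  intro X
  induction X with
  | nil => intro k; simp
  | cons a X' ih =>
    intro k
    by_cases ha : a = c
    · subst ha
      simp [List.take_succ_cons, List.erase_cons_head, List.take_take]
    · have hba : (a == c) = false := by simp [ha]
      cases k with
      | zero => simp
      | succ k' =>
        have e1 : ((a :: X').take (k' + 1 + 1)).erase c
            = a :: (X'.take (k' + 1)).erase c := by
          simp [List.take_succ_cons, hba]
        have e2 : (a :: X').erase c = a :: X'.erase c := by
          simp [hba]
        rw [e1, e2, List.take_succ_cons, List.take_succ_cons, ih k']

-- the first `cacheSize` of the recency order, stepped by one access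
theorem gstep (k : Nat) (r : List String) (c : String) :
    (firsts (c :: r)).take (k+1) = c :: (((firsts r).take (k+1)).erase c).take k := by
  simp only [firsts, List.take_succ_cons, take_erase]

-- splitting r at the first occurrence of c
theorem split_at_first (r : List String) (c : String) (hc : c ∈ r) :
    ∃ v, r = r.takeWhile (fun x => x != c) ++ c :: v ∧
      c ∉ r.takeWhile (fun x => x != c) := by
  have hnn : r.dropWhile (fun x => x != c) ≠ [] := by
    intro h
    rw [List.dropWhile_eq_nil_iff] at h
    have := h c hc
    simp at this
  obtain ⟨d, v, hd⟩ := List.exists_cons_of_ne_nil hnn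
  have hdc : d = c := by
    have h2 := List.head?_dropWhile_not (fun x => x != c) r
    rw [hd] at h2
    simpa using h2
  rw [hdc] at hd
  refine ⟨v, ?_, ?_⟩
  · have hsplit : r.takeWhile (fun x => x != c) ++ r.dropWhile (fun x => x != c) = r :=
      List.takeWhile_append_dropWhile
    conv_lhs => rw [← hsplit]
    rw [hd]
  · intro hmem
    have := List.mem_takeWhile_imp hmem
    simp at this

-- position of c in the recency order = number of distinct elements before it
theorem firsts_split (c : String) : ∀ (u v : List String), c ∉ u →
    ∃ W, firsts (u ++ c :: v) = firsts u ++ c :: W := by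
  intro u
  induction u with
  | nil => intro v _; exact ⟨(firsts v).erase c, rfl⟩
  | cons a u' ih =>
    intro v hcu
    have hac : a ≠ c := fun h => hcu (by simp [h])
    have hcu' : c ∉ u' := fun h => hcu (List.mem_cons_of_mem _ h)
    obtain ⟨W', hW'⟩ := ih v hcu'
    by_cases hmem : a ∈ firsts u'
    · refine ⟨W', ?_⟩
      simp only [List.cons_append, firsts, hW', List.erase_append_left _ hmem]
    · refine ⟨W'.erase a, ?_⟩
      have h2 : (firsts u').erase a = firsts u' := List.erase_of_not_mem hmem
      simp only [List.cons_append, firsts, hW', List.erase_append_right _ hmem,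
        h2, List.erase_cons]
      have hca : (c == a) = false := by simp [Ne.symm hac]
      simp [hca]

-- membership in the truncated recency order ⟺ distinct-count bound
theorem mem_take_firsts (K : Nat) (u v : List String) (c : String) (hcu : c ∉ u) :
    c ∈ (firsts (u ++ c :: v)).take K ↔ (firsts u).length < K := by
  obtain ⟨W, hW⟩ := firsts_split c u v hcu
  have hcfu : c ∉ firsts u := fun h => hcu ((mem_firsts u c).mp h)
  rw [hW, List.take_append]
  constructor
  · intro h
    rcases List.mem_append.mp h with h1 | h1
    · exact absurd (List.mem_of_mem_take h1) hcfu
    · by_contra hK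
      have : K - (firsts u).length = 0 := by omega
      rw [this] at h1
      simp at h1
  · intro h
    refine List.mem_append.mpr (Or.inr ?_)
    have : ∃ m, K - (firsts u).length = m + 1 := ⟨K - (firsts u).length - 1, by omega⟩
    obtain ⟨m, hm⟩ := this
    rw [hm, List.take_succ_cons]
    exact List.mem_cons_self

-- B's per-access cost decides exactly membership in A's cache list
theorem accessCost_hit (cap : Int) (hcap : 0 ≤ cap) (r : List String) (c : String)
    (M : List String) (hM : M = (firsts r).take cap.toNat) :
    accessCost cap c r PySem.Set.empty = if c ∈ M then 1 else 5 := by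
  rw [accessCost_eq]
  by_cases hc : c ∈ r
  · rw [if_pos hc, set_ofList_length]
    obtain ⟨v, hr, hcu⟩ := split_at_first r c hc
    have hmem : c ∈ M ↔ (firsts (r.takeWhile (fun x => x != c))).length < cap.toNat := by
      rw [hM]
      conv_lhs => rw [hr]
      exact mem_take_firsts _ _ _ _ hcu
    have hcnt : ((firsts (r.takeWhile (fun x => x != c))).length : Int) < cap ↔
        (firsts (r.takeWhile (fun x => x != c))).length < cap.toNat := by omega
    by_cases hin : c ∈ M
    · rw [if_pos hin, if_pos (hcnt.mpr (hmem.mp hin))]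
    · rw [if_neg hin, if_neg (fun h => hin (hmem.mpr (hcnt.mp h)))]
  · rw [if_neg hc]
    have : c ∉ M := by
      rw [hM]
      intro h
      exact hc ((mem_firsts r c).mp (List.mem_of_mem_take h))
    rw [if_neg this]

-- the two loops agree under the invariant: A's list (tail→head reversed) is the
-- first `cacheSize` elements of the recency order of the reversed history
theorem loops_eq (cap : Int) (hcap : 0 ≤ cap) :
    ∀ (rest hist lst : List String) (t : Int),
      lst.reverse = (firsts hist.reverse).take cap.toNat →
      solutionLoopA cap lst (lst.length : Int) t rest = altLoop cap hist rest t := by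
  intro rest
  induction rest with
  | nil => intro hist lst t _; rfl
  | cons city rest ih =>
    intro hist lst t hinv
    simp only [solutionLoopA, altLoop]
    set c := PySem.Str.lower city with hc
    set r := hist.reverse with hr
    set M := (firsts r).take cap.toNat with hMdef
    have hlst : lst = M.reverse := by rw [← hinv, List.reverse_reverse]
    have hndM : M.Nodup := ((firsts r).take_sublist _).nodup (nodup_firsts r)
    have hmemM : ∀ x, lst.contains x = true ↔ x ∈ M := by
      intro x; rw [List.contains_iff_mem, hlst, List.mem_reverse]
    have hcost : accessCost cap c r PySem.Set.empty = if lst.contains c then 1 else 5 := by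
      rw [accessCost_hit cap hcap r c M hMdef]
      by_cases hcm : c ∈ M
      · rw [if_pos hcm, if_pos ((hmemM c).mpr hcm)]
      · rw [if_neg hcm, if_neg (fun h => hcm ((hmemM c).mp h))]
    have hrev' : (hist ++ [c]).reverse = c :: r := by simp [hr]
    have hMlen : M.length ≤ cap.toNat := by rw [hMdef]; exact List.length_take_le _ _
    have hcost' : (if lst.contains c then t + 1 else t + 5)
        = t + accessCost cap c r PySem.Set.empty := by
      rw [hcost]
      by_cases h : lst.contains c = true
      · rw [if_pos h, if_pos h]
      · rw [if_neg h, if_neg h]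
    rw [hcost']
    by_cases h0 : cap = 0
    · -- capacity 0: nothing is ever stored
      have hK : cap.toNat = 0 := by omega
      have hlst0 : lst = [] := by rw [hlst, hMdef, hK]; rfl
      simp only [lruAppendA, if_pos h0]
      have hinv' : lst.reverse = (firsts ((hist ++ [c]).reverse)).take cap.toNat := by
        rw [hlst0, hK]; rfl
      exact ih (hist ++ [c]) lst _ hinv'
    · obtain ⟨k, hk⟩ : ∃ k, cap.toNat = k + 1 := ⟨cap.toNat - 1, by omega⟩
      have hM' : (firsts r).take (k + 1) = M := by rw [hMdef, hk]
      by_cases hhit : lst.contains c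
      · -- hit: move to tail
        have hcM : c ∈ M := (hmemM c).mp hhit
        have hcl : c ∈ lst := by rw [hlst, List.mem_reverse]; exact hcM
        simp only [lruAppendA, if_neg h0, hhit, if_true]
        have hpos := List.length_pos_of_mem hcl
        have hlen : (((lst.erase c ++ [c]).length : Nat) : Int)
            = ((lst.length : Nat) : Int) - 1 + 1 := by
          simp [List.length_erase_of_mem hcl]
          omega
        have herase : (lst.erase c).reverse = M.erase c := by
          rw [hlst]
          have hndl : M.reverse.Nodup := List.nodup_reverse.mpr hndM
          rw [hndl.erase_eq_filter, hndM.erase_eq_filter, ← List.filter_reverse,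
            List.reverse_reverse]
        have hMel : (M.erase c).length ≤ k := by
          have := List.length_erase_of_mem hcM
          omega
        have hinv' : (lst.erase c ++ [c]).reverse
            = (firsts ((hist ++ [c]).reverse)).take cap.toNat := by
          rw [hrev', hk, gstep, hM']
          rw [List.reverse_append, List.reverse_singleton, List.singleton_append,
            herase, List.take_of_length_le hMel]
        rw [← hlen]
        exact ih (hist ++ [c]) (lst.erase c ++ [c]) _ hinv'
      · have hcM : c ∉ M := fun h => hhit ((hmemM c).mpr h)
        have hMe : M.erase c = M := List.erase_of_not_mem hcM
        simp only [lruAppendA, if_neg h0, hhit, Bool.false_eq_true, if_false]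
        by_cases hfull : ((lst.length : Nat) : Int) = cap
        · -- miss on a full cache: evict the head
          rw [if_pos hfull]
          have hlenM : M.length = k + 1 := by
            have h1 : lst.length = M.length := by rw [hlst]; simp
            omega
          have hlL : lst.length = k + 1 := by
            have h1 : lst.length = M.length := by rw [hlst]; simp
            omega
          have hlen : (((lst.drop 1 ++ [c]).length : Nat) : Int)
              = ((lst.length : Nat) : Int) - 1 + 1 := by
            simp [hlL]
          have hdrop : (lst.drop 1).reverse = M.take k := by
            rw [hlst, List.reverse_drop, List.reverse_reverse, List.length_reverse,
              hlenM]
            norm_num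
          have hinv' : (lst.drop 1 ++ [c]).reverse
              = (firsts ((hist ++ [c]).reverse)).take cap.toNat := by
            rw [hrev', hk, gstep, hM', hMe]
            rw [List.reverse_append, List.reverse_singleton, List.singleton_append,
              hdrop]
          rw [← hlen]
          exact ih (hist ++ [c]) (lst.drop 1 ++ [c]) _ hinv'
        · -- miss with room: append
          rw [if_neg hfull]
          have hlenM : M.length ≤ k := by
            have h1 : lst.length = M.length := by rw [hlst]; simp
            omega
          have hlen : (((lst ++ [c]).length : Nat) : Int)
              = ((lst.length : Nat) : Int) + 1 := by simp
          have hinv' : (lst ++ [c]).reverse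
              = (firsts ((hist ++ [c]).reverse)).take cap.toNat := by
            rw [hrev', hk, gstep, hM', hMe, List.take_of_length_le hlenM]
            rw [List.reverse_append, List.reverse_singleton, List.singleton_append,
              hinv]
          rw [← hlen]
          exact ih (hist ++ [c]) (lst ++ [c]) _ hinv'

-- ===== VERDICT (by name: the statement is the Claim_ definition above) =====
theorem solution_spec : Claim_equal_solution := by
  intro cacheSize cities _ hpre
  show solution cacheSize cities = solution_alt cacheSize cities
  unfold solution solution_alt
  have := loops_eq cacheSize hpre cities [] [] 0 (by simp [firsts])
  simpa using this
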